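-- pv_equiv track=rewrite | github.com/notlosca/auslan-classification | utils.py | compute_allowed_edges
-- ===== SOURCE A (Python) =====
-- from typing import Tuple
-- from itertools import combinations
-- from typing import List, Tuple
--
-- def compute_allowed_edges(nodes:List[Tuple], allowed_combinations:list=[(0,1), (1,0), (1,1)]) -> List[Tuple]:
--     """
--     Compute allowed edges from all possible combination of 2 nodes following the allowed set of combinations.
--
--     Args:
--         nodes (List[Tuple]): List of nodes from which we compute all possible combinations.
--         allowed_combinations (list, optional): Set of allowed transitions. Defaults to [(0,1), (1,0), (1,1)].
--
--     Returns:
--         List[Tuple]: List of edges following the allowed_combinations list.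
--     """
--     combs = list(combinations(nodes, 2))
--
--     allowed_edges = []
--     illegal_edges = []
--
--     for combination in combs:
--         c0 = combination[0]
--         c1 = combination[1]
--         res = (c1[0]-c0[0], c1[1]-c0[1])
--         if res in allowed_combinations:
--             allowed_edges.append(combination)
--         else:
--             illegal_edges.append(combination)
--     return allowed_edges
-- ===== SOURCE B (Python) =====
-- def compute_allowed_edges(nodes, allowed_combinations=[(0,1), (1,0), (1,1)]):
--     # Index nodes by coordinate, then for each node probe only the allowed
--     # offsets in the index instead of scanning all pairs.
--     index = {}
--     for j, p in enumerate(nodes):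
--         index.setdefault(p, []).append(j)
--     offsets = set(allowed_combinations)
--     edges = []
--     for i, p in enumerate(nodes):
--         cands = []
--         for off in offsets:
--             target = (p[0] + off[0], p[1] + off[1])
--             for j in index.get(target, []):
--                 if j > i:
--                     cands.append((j, target))
--         cands.sort(key=lambda c: c[0])
--         for c in cands:
--             edges.append((p, c[1]))
--     return edges
-- ===== Notes on version B (the rewrite author's own statement) =====
-- stated objective: faster
-- what changed: Instead of enumerating all O(n^2) node pairs and testing each difference against the allowed list, B builds a dict from coordinate to its (increasing) positions once, probes it with node+offset for each of the k distinct allowed offsets, and sorts each node's few candidates by position to reproduce A's pair order exactly.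
import Mathlib
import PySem

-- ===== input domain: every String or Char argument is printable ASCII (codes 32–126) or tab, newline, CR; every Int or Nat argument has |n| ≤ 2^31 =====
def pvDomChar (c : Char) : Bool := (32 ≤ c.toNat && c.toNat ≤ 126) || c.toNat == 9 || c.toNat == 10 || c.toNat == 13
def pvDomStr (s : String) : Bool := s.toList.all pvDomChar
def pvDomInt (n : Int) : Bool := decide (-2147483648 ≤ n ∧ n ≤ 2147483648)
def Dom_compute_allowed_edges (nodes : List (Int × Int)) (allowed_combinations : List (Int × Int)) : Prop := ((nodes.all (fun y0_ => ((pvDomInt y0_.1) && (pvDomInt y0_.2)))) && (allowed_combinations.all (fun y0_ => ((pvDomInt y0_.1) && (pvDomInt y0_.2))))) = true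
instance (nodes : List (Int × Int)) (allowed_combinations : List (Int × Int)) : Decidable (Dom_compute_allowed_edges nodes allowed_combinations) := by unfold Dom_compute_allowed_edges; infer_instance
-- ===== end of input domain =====

-- B replaces A's scan of all O(n^2) node pairs by a coordinate-keyed index probed
-- only at the allowed offsets (objective: faster, asymptotic).

-- ===== PORT A =====
-- itertools.combinations(nodes, 2) as a list of pairs, in CPython's order
def pvPairs2 {α : Type} : List α → List (α × α)
  | [] => []
  | h :: t => t.map (fun x => (h, x)) ++ pvPairs2 t

def compute_allowed_edges (nodes : List (Int × Int)) (allowed_combinations : List (Int × Int)) : List ((Int × Int) × (Int × Int)) :=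
  let combs := pvPairs2 nodes
  let s := combs.foldl
    (fun (s : List ((Int × Int) × (Int × Int)) × List ((Int × Int) × (Int × Int))) combination =>
      let c0 := combination.1
      let c1 := combination.2
      let res := (c1.1 - c0.1, c1.2 - c0.2)
      if allowed_combinations.contains res then (s.1 ++ [combination], s.2)
      else (s.1, s.2 ++ [combination]))
    ([], [])
  s.1  -- allowed_edges; illegal_edges (s.2) is built and discarded, as in A

-- ===== PORT B =====
def compute_allowed_edges_alt (nodes : List (Int × Int)) (allowed_combinations : List (Int × Int)) : List ((Int × Int) × (Int × Int)) :=
  let index : PySem.Dict (Int × Int) (List Int) :=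
    (PySem.List.enumerate nodes).foldl
      (fun d e => d.modify e.2 [] (fun l => l ++ [e.1])) PySem.Dict.empty
  let offsets : PySem.Set (Int × Int) := PySem.Set.ofList allowed_combinations
  (PySem.List.enumerate nodes).foldl
    (fun edges e =>
      let cands := offsets.foldl
        (fun cs off =>
          let target := (e.2.1 + off.1, e.2.2 + off.2)
          cs ++ ((index.getD target []).filter (fun j => e.1 < j)).map (fun j => (j, target)))
        []
      let sortedCands := PySem.List.sorted cands (fun c => c.1) false
      edges ++ sortedCands.map (fun c => (e.2, c.2)))
    []

-- ===== PRECONDITION & SPEC =====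
def Spec_compute_allowed_edges (nodes : List (Int × Int)) (allowed_combinations : List (Int × Int)) (out : List ((Int × Int) × (Int × Int))) : Prop := out = compute_allowed_edges_alt nodes allowed_combinations
instance (nodes : List (Int × Int)) (allowed_combinations : List (Int × Int)) (out : List ((Int × Int) × (Int × Int))) : Decidable (Spec_compute_allowed_edges nodes allowed_combinations out) := by unfold Spec_compute_allowed_edges; infer_instance

-- ===== CLAIM (what is proved, stated in full; the proofs are below) =====
def Claim_equal_compute_allowed_edges : Prop := ∀ (nodes : List (Int × Int)) (allowed_combinations : List (Int × Int)), Dom_compute_allowed_edges nodes allowed_combinations → Spec_compute_allowed_edges nodes allowed_combinations (compute_allowed_edges nodes allowed_combinations)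

-- ===== LEMMAS AND PROOFS =====

theorem pvA_fold (allowed : List (Int × Int)) :
    ∀ (l : List ((Int × Int) × (Int × Int))) (a b : List ((Int × Int) × (Int × Int))),
    (l.foldl
      (fun (s : List ((Int × Int) × (Int × Int)) × List ((Int × Int) × (Int × Int))) c =>
        if allowed.contains (c.2.1 - c.1.1, c.2.2 - c.1.2) then (s.1 ++ [c], s.2)
        else (s.1, s.2 ++ [c])) (a, b)).1
    = a ++ l.filter (fun c => allowed.contains (c.2.1 - c.1.1, c.2.2 - c.1.2)) := by
  intro l
  induction l with
  | nil => simp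
  | cons h t ih =>
    intro a b
    simp only [List.foldl_cons, List.filter_cons]
    cases hc : allowed.contains (h.2.1 - h.1.1, h.2.2 - h.1.2) with
    | true => rw [if_pos rfl, if_pos rfl, ih, List.append_assoc, List.singleton_append]
    | false => rw [if_neg (by simp), if_neg (by simp), ih]

theorem pvA_eq (nodes : List (Int × Int)) (allowed : List (Int × Int)) :
    compute_allowed_edges nodes allowed
    = (pvPairs2 nodes).filter (fun c => allowed.contains (c.2.1 - c.1.1, c.2.2 - c.1.2)) := by
  show ((pvPairs2 nodes).foldl
      (fun (s : List ((Int × Int) × (Int × Int)) × List ((Int × Int) × (Int × Int))) c =>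
        if allowed.contains (c.2.1 - c.1.1, c.2.2 - c.1.2) then (s.1 ++ [c], s.2)
        else (s.1, s.2 ++ [c])) ([], [])).1 = _
  rw [pvA_fold, List.nil_append]

theorem pvIndex_getD (nodes : List (Int × Int)) (p : Int × Int) :
    ((PySem.List.enumerate nodes).foldl
      (fun d e => d.modify e.2 [] (fun l => l ++ [e.1])) PySem.Dict.empty).getD p []
    = ((PySem.List.enumerate nodes).filter (fun e => e.2 == p)).map (fun e => e.1) := by
  rw [show (PySem.List.enumerate nodes).foldl
        (fun d e => d.modify e.2 [] (fun l => l ++ [e.1])) PySem.Dict.empty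
      = ((PySem.List.enumerate nodes).map Prod.swap).foldl
        (fun d q => d.modify q.1 [] (fun l => l ++ [q.2])) PySem.Dict.empty
      from (List.foldl_map (f := Prod.swap) (g := fun d q => PySem.Dict.modify d q.1 [] (fun l => l ++ [q.2])) (l := PySem.List.enumerate nodes) (init := PySem.Dict.empty)).symm]
  rw [PySem.Dict.getD_foldl_modify_append]
  rw [PySem.Dict.getD_empty, List.nil_append, List.filter_map, List.map_map]
  rfl

theorem pvSeg (nodes allowed : List (Int × Int)) (i : Int) (p : Int × Int) :
    PySem.List.sorted
      ((PySem.Set.ofList allowed).foldl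
        (fun cs off =>
          cs ++ ((((PySem.List.enumerate nodes).foldl
            (fun d e => d.modify e.2 [] (fun l => l ++ [e.1])) PySem.Dict.empty).getD
              (p.1 + off.1, p.2 + off.2) []).filter (fun j => i < j)).map
                (fun j => (j, (p.1 + off.1, p.2 + off.2))))
        [])
      (fun c => c.1) false
    = (PySem.List.enumerate nodes).filter
        (fun e => decide (i < e.1) && allowed.contains (e.2.1 - p.1, e.2.2 - p.2)) := by
  rw [PySem.List.foldl_append_eq_flatMap, List.nil_append]
  set E := PySem.List.enumerate nodes with hE
  set g : (Int × Int) → List (Int × (Int × Int)) := fun off =>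
    (((E.foldl (fun d e => d.modify e.2 [] (fun l => l ++ [e.1])) PySem.Dict.empty).getD
      (p.1 + off.1, p.2 + off.2) []).filter (fun j => i < j)).map
        (fun j => (j, (p.1 + off.1, p.2 + off.2))) with hg
  set ys := E.filter (fun e => decide (i < e.1) && allowed.contains (e.2.1 - p.1, e.2.2 - p.2)) with hys
  have hidx : ∀ q, (E.foldl (fun d e => d.modify e.2 [] (fun l => l ++ [e.1])) PySem.Dict.empty).getD q []
      = (E.filter (fun e => e.2 == q)).map (fun e => e.1) := by
    intro q; rw [hE]; exact pvIndex_getD nodes q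
  have hEp : E.Pairwise (fun a b => a.1 < b.1) := PySem.List.pairwise_lt_enumerate nodes 0
  have hys_pw : ys.Pairwise (fun a b => a.1 < b.1) := hEp.filter _
  have hys_nd : ys.Nodup := hys_pw.imp (fun h => by intro he; subst he; exact lt_irrefl _ h)
  -- elements of g off
  have hgmem : ∀ off c, c ∈ g off ↔ c ∈ E ∧ i < c.1 ∧ c.2 = (p.1 + off.1, p.2 + off.2) := by
    intro off c
    rw [hg]
    simp only [hidx, List.mem_map, List.mem_filter]
    constructor
    · rintro ⟨j, ⟨⟨e, ⟨heE, hbeq⟩, rfl⟩, hij⟩, rfl⟩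
      have : e.2 = (p.1 + off.1, p.2 + off.2) := by simpa using hbeq
      refine ⟨?_, by simpa using hij, rfl⟩
      have : (e.1, (p.1 + off.1, p.2 + off.2)) = e := by
        rw [← this]
      rw [this]; exact heE
    · rintro ⟨hcE, hic, hc2⟩
      refine ⟨c.1, ⟨⟨c, ⟨hcE, by simp [hc2]⟩, rfl⟩, by simpa using hic⟩, ?_⟩
      rw [← hc2]
  -- membership in the flatMap
  have hmem : ∀ c, c ∈ (PySem.Set.ofList allowed).flatMap g ↔ c ∈ ys := by
    intro c
    rw [List.mem_flatMap, hys]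
    constructor
    · rintro ⟨off, hoff, hcg⟩
      rw [hgmem] at hcg
      obtain ⟨hcE, hic, hc2⟩ := hcg
      rw [List.mem_filter]
      refine ⟨hcE, ?_⟩
      have hoff' : off ∈ allowed := (PySem.Set.mem_ofList allowed off).1 hoff
      simp only [Bool.and_eq_true, decide_eq_true_eq]
      refine ⟨hic, ?_⟩
      have h1 : c.2.1 - p.1 = off.1 := by rw [hc2]; ring
      have h2 : c.2.2 - p.2 = off.2 := by rw [hc2]; ring
      rw [h1, h2]
      simpa using hoff'
    · intro hcy
      rw [List.mem_filter] at hcy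
      obtain ⟨hcE, hcond⟩ := hcy
      simp only [Bool.and_eq_true, decide_eq_true_eq] at hcond
      obtain ⟨hic, hcont⟩ := hcond
      refine ⟨(c.2.1 - p.1, c.2.2 - p.2), ?_, ?_⟩
      · rw [PySem.Set.mem_ofList]; simpa using hcont
      · rw [hgmem]
        exact ⟨hcE, hic, by ext <;> simp⟩
  -- nodup of the flatMap
  have hnd : ((PySem.Set.ofList allowed).flatMap g).Nodup := by
    rw [List.nodup_flatMap]
    constructor
    · intro off _
      rw [hg]
      apply List.Nodup.map
      · intro a b hab; simpa using congrArg Prod.fst hab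
      · apply List.Nodup.filter
        rw [hidx]
        have : ((E.filter (fun e => e.2 == (p.1 + off.1, p.2 + off.2))).map (fun e => e.1)).Pairwise (· < ·) := by
          rw [List.pairwise_map]
          exact hEp.filter _
        exact this.imp (fun h => ne_of_lt h)
    · have hnoff : (PySem.Set.ofList allowed).Nodup := PySem.Set.nodup_ofList allowed
      refine hnoff.imp ?_
      intro off off' hne c hc hc'
      rw [hgmem] at hc hc'
      obtain ⟨-, -, h1⟩ := hc
      obtain ⟨-, -, h2⟩ := hc'
      apply hne
      rw [h1] at h2
      have := Prod.mk.injEq .. ▸ h2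
      ext
      · omega
      · omega
  have hperm : ys.Perm ((PySem.Set.ofList allowed).flatMap g) :=
    (List.perm_ext_iff_of_nodup hys_nd hnd).mpr (fun a => (hmem a).symm)
  exact PySem.List.sorted_eq_of_perm_of_pairwise_lt _ _ _ hperm hys_pw

theorem pvProj (P : (Int × Int) → Bool) (x : Int × Int) :
    ∀ (t : List (Int × Int)) (s : Int),
    ((PySem.List.enumerate t s).filter (fun e => P e.2)).map (fun e => (x, e.2))
    = (t.filter P).map (fun y => (x, y)) := by
  intro t
  induction t with
  | nil => intro s; rfl
  | cons y t ih =>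
    intro s
    rw [PySem.List.enumerate_cons, List.filter_cons, List.filter_cons]
    by_cases hp : P y
    · simp only [hp, if_pos]
      rw [List.map_cons, List.map_cons, ih]
    · simp only [hp]
      rw [if_neg (by simp), if_neg (by simp), ih]

theorem pvMain (Q : (Int × Int) → (Int × Int) → Bool) :
    ∀ (nodes : List (Int × Int)) (s : Int),
    (PySem.List.enumerate nodes s).flatMap
      (fun e => ((PySem.List.enumerate nodes s).filter
          (fun e' => decide (e.1 < e'.1) && Q e.2 e'.2)).map (fun e' => (e.2, e'.2)))
    = (pvPairs2 nodes).filter (fun c => Q c.1 c.2) := by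
  intro nodes
  induction nodes with
  | nil => intro s; rfl
  | cons x t ih =>
    intro s
    rw [PySem.List.enumerate_cons, List.flatMap_cons]
    have hgt : ∀ e ∈ PySem.List.enumerate t (s + 1), s < e.1 := by
      intro e he
      rw [PySem.List.mem_enumerate_iff] at he
      obtain ⟨k, hk, rfl⟩ := he
      omega
    -- head segment
    have hhead : (((s, x) :: PySem.List.enumerate t (s + 1)).filter
        (fun e' => decide ((s, x).1 < e'.1) && Q (s, x).2 e'.2)).map (fun e' => ((s, x).2, e'.2))
        = (t.filter (fun y => Q x y)).map (fun y => (x, y)) := by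
      rw [List.filter_cons]
      rw [if_neg (by simp)]
      rw [List.filter_congr (q := fun e' => Q x e'.2)
        (fun e' he' => by simp [hgt e' he'])]
      exact pvProj (fun y => Q x y) x t (s + 1)
    rw [hhead]
    -- tail segments: the head of the filtered list never passes the index test
    have htail : (PySem.List.enumerate t (s + 1)).flatMap
        (fun e => (((s, x) :: PySem.List.enumerate t (s + 1)).filter
          (fun e' => decide (e.1 < e'.1) && Q e.2 e'.2)).map (fun e' => (e.2, e'.2)))
        = (PySem.List.enumerate t (s + 1)).flatMap
        (fun e => ((PySem.List.enumerate t (s + 1)).filter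
          (fun e' => decide (e.1 < e'.1) && Q e.2 e'.2)).map (fun e' => (e.2, e'.2))) := by
      apply List.flatMap_congr
      intro e he
      rw [List.filter_cons, if_neg (by have := hgt e he; simp; omega)]
    rw [htail, ih]
    show _ = List.filter _ (t.map (fun y => (x, y)) ++ pvPairs2 t)
    rw [List.filter_append, List.filter_map]
    rfl

theorem pvB_eq (nodes : List (Int × Int)) (allowed : List (Int × Int)) :
    compute_allowed_edges_alt nodes allowed
    = (pvPairs2 nodes).filter (fun c => allowed.contains (c.2.1 - c.1.1, c.2.2 - c.1.2)) := by
  show (PySem.List.enumerate nodes).foldl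
      (fun edges e => edges ++ (PySem.List.sorted
        ((PySem.Set.ofList allowed).foldl
          (fun cs off =>
            cs ++ ((((PySem.List.enumerate nodes).foldl
              (fun d e => d.modify e.2 [] (fun l => l ++ [e.1])) PySem.Dict.empty).getD
                (e.2.1 + off.1, e.2.2 + off.2) []).filter (fun j => e.1 < j)).map
                  (fun j => (j, (e.2.1 + off.1, e.2.2 + off.2))))
          [])
        (fun c => c.1) false).map (fun c => (e.2, c.2))) [] = _
  rw [PySem.List.foldl_append_eq_flatMap, List.nil_append]
  rw [List.flatMap_congr (g := fun e => ((PySem.List.enumerate nodes).filter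
      (fun e' => decide (e.1 < e'.1) && allowed.contains (e'.2.1 - e.2.1, e'.2.2 - e.2.2))).map
        (fun e' => (e.2, e'.2)))
    (fun e _ => by rw [pvSeg nodes allowed e.1 e.2])]
  exact pvMain (fun p q => allowed.contains (q.1 - p.1, q.2 - p.2)) nodes 0

-- ===== VERDICT (by name: the statement is the Claim_ definition above) =====
theorem compute_allowed_edges_spec : Claim_equal_compute_allowed_edges := by
  intro nodes allowed _
  unfold Spec_compute_allowed_edges
  rw [pvA_eq, pvB_eq]
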